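-- pv_equiv track=rewrite | github.com/zoutei/TSST_Syndiff_Core | modern_padding.py | analyze_cell_positions
-- ===== SOURCE A (Python) =====
-- from dataclasses import dataclass
--
-- @dataclass
-- class CellPositionInfo:
--     """Information about a cell's position within its row."""
--
--     actual_index: int  # Index within this specific row
--     is_first: bool  # First in this actual row
--     is_last: bool  # Last in this actual row
--     is_interior: bool  # Interior cell in row
--     cell_position: str  # "first", "last", "interior"
--
-- def analyze_cell_positions(row_cells: list[str]) -> dict[str, CellPositionInfo]:
--     """Analyze position of each cell within its actual row."""
--     positions = {}
--     actual_row_size = len(row_cells)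
--
--     for i, cell_name in enumerate(row_cells):
--         is_first = i == 0
--         is_last = i == actual_row_size - 1
--         # is_interior = 0 < i < actual_row_size - 1
--
--         if is_first:
--             position_type = "first"
--         elif is_last:
--             position_type = "last"
--         else:
--             position_type = "interior"
--
--         positions[cell_name] = position_type
--
--     return positions
-- ===== SOURCE B (Python) =====
-- def analyze_cell_positions(row_cells: list[str]):
--     """Streaming lookahead pass: classify each cell by whether a successor exists,
--     carrying the previous cell and a first-seen flag; no indices or length used."""
--     positions = {}
--     it = iter(row_cells)
--     prev = next(it, None)
--     if prev is None:
--         return positions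
--     pending_first = True
--     for cur in it:
--         positions[prev] = "first" if pending_first else "interior"
--         pending_first = False
--         prev = cur
--     positions[prev] = "first" if pending_first else "last"
--     return positions
-- ===== Notes on version B (the rewrite author's own statement) =====
-- stated objective: alternative
-- what changed: Replaces A's index-arithmetic enumerate loop (compare i against 0 and len-1) by a streaming lookahead pass over an iterator that never computes indices or the length: it carries the previous cell and a first-seen flag, labels a cell when its successor is seen, and labels the carried final cell at the end.
import Mathlib
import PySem

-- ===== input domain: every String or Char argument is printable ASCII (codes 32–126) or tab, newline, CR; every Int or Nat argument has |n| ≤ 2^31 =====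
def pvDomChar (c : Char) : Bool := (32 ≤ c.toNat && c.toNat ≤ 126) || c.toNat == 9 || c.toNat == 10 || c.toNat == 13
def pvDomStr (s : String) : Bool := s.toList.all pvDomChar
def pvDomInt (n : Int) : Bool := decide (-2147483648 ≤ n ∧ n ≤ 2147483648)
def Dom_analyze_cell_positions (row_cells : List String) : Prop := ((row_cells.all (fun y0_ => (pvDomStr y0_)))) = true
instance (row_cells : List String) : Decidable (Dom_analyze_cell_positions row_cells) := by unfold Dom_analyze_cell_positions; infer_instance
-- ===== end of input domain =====

-- B replaces A's index-arithmetic enumerate loop by a streaming lookahead pass (carried previous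
-- cell + first-seen flag, no indices or length); return-value equivalence is proved.


-- ===== PORT A =====
def analyze_cell_positions (row_cells : List String) : List (String × String) :=
  let actual_row_size := row_cells.length
  let positions : PySem.Dict String String :=
    (PySem.List.enumerate row_cells 0).foldl
      (fun positions p =>
        let i := p.1
        let cell_name := p.2
        let is_first := i == 0
        let is_last := i == (actual_row_size : Int) - 1
        let position_type := if is_first then "first" else if is_last then "last" else "interior"
        positions.insert cell_name position_type)
      PySem.Dict.empty
  positions.items

-- ===== PORT B =====
-- B's loop state: (positions, prev, pending_first); 'next(it, None)' is the head match.
def analyze_cell_positions_alt (row_cells : List String) : List (String × String) :=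
  match row_cells with
  | [] => ([] : List (String × String))
  | p0 :: rest =>
    let st :=
      rest.foldl
        (fun (s : PySem.Dict String String × String × Bool) cur =>
          (s.1.insert s.2.1 (if s.2.2 then "first" else "interior"), cur, false))
        (PySem.Dict.empty, p0, true)
    (st.1.insert st.2.1 (if st.2.2 then "first" else "last")).items

-- ===== PRECONDITION & SPEC =====
def Spec_analyze_cell_positions (row_cells : List String) (out : List (String × String)) : Prop := out = analyze_cell_positions_alt row_cells
instance (row_cells : List String) (out : List (String × String)) : Decidable (Spec_analyze_cell_positions row_cells out) := by unfold Spec_analyze_cell_positions; infer_instance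

-- ===== CLAIM (what is proved, stated in full; the proofs are below) =====
def Claim_equal_analyze_cell_positions : Prop := ∀ (row_cells : List String), Dom_analyze_cell_positions row_cells → Spec_analyze_cell_positions row_cells (analyze_cell_positions row_cells)

-- ===== LEMMAS AND PROOFS =====

-- A's loop after the first iteration (indices k ≥ 1, with k + ys.length = total length n):
-- every element gets "interior" except the final one, which gets "last".
theorem foldA_tail (n : Int) (ys : List String) : ∀ (k : Nat) (d : PySem.Dict String String),
    1 ≤ k → (k : Int) + ys.length = n →
    (PySem.List.enumerate ys (k : Int)).foldl
      (fun positions p =>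
        positions.insert p.2
          (if p.1 == 0 then "first" else if p.1 == n - 1 then "last" else "interior")) d
    = match ys with
      | [] => d
      | _ :: _ =>
          (ys.dropLast.foldl (fun d name => d.insert name "interior") d).insert (ys.getLast!) "last" := by
  induction ys with
  | nil => intro k d _ _; simp [PySem.List.enumerate_nil]
  | cons z zs ih =>
    intro k d hk hn
    rw [PySem.List.enumerate_cons]
    simp only [List.foldl_cons]
    have hk0 : ((k : Int) == 0) = false := by simp; omega
    cases zs with
    | nil =>
      have hlast : ((k : Int) == n - 1) = true := by
        simp only [List.length_cons, List.length_nil] at hn; simp; omega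
      simp [hk0, hlast, PySem.List.enumerate_nil]
    | cons w ws =>
      have hlast : ((k : Int) == n - 1) = false := by
        simp only [List.length_cons] at hn; simp; push_cast at hn ⊢; omega
      have hk1 : ((k + 1 : Nat) : Int) = (k : Int) + 1 := by push_cast; ring
      have := ih (k + 1) (d.insert z (if ((k:Int) == 0) = true then "first"
          else if ((k:Int) == n - 1) = true then "last" else "interior"))
        (by omega) (by simp only [List.length_cons] at hn ⊢; push_cast at hn ⊢; omega)
      rw [hk1] at this
      simp only [hk0, hlast, if_false, Bool.false_eq_true] at this ⊢
      rw [this]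
      rfl

-- B's loop once the flag is down: it inserts the carried element and all but the last of ys
-- as "interior" and ends carrying ys's last element with the flag still down.
theorem foldB_tail (ys : List String) : ∀ (d : PySem.Dict String String) (prev : String),
    ys ≠ [] →
    ys.foldl
      (fun (s : PySem.Dict String String × String × Bool) cur =>
        (s.1.insert s.2.1 (if s.2.2 then "first" else "interior"), cur, false))
      (d, prev, false)
    = ((prev :: ys.dropLast).foldl (fun d name => d.insert name "interior") d, ys.getLast!, false) := by
  induction ys with
  | nil => intro _ _ h; exact absurd rfl h
  | cons z zs ih =>
    intro d prev _
    cases zs with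
    | nil => simp
    | cons w ws =>
      have h := ih (d.insert prev "interior") z (by simp)
      simp only [List.foldl_cons, Bool.false_eq_true, if_false] at h ⊢
      rw [h]
      simp

theorem analyze_cell_positions_eq (row_cells : List String) :
    analyze_cell_positions row_cells = analyze_cell_positions_alt row_cells := by
  cases row_cells with
  | nil => rfl
  | cons c rest =>
    simp only [analyze_cell_positions, analyze_cell_positions_alt]
    rw [PySem.List.enumerate_cons]
    simp only [List.foldl_cons]
    rw [show ((0 : Int) + 1) = ((1 : Nat) : Int) by norm_num]
    have hA := foldA_tail ((c :: rest).length : Int) rest 1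
      (PySem.Dict.empty.insert c (if ((0:Int) == 0) then "first"
        else if ((0:Int) == ((c :: rest).length : Int) - 1) then "last" else "interior"))
      (by omega) (by simp; ring)
    simp only [show ((0 : Int) == 0) = true from rfl, if_true] at hA ⊢
    rw [hA]
    cases rest with
    | nil => rfl
    | cons w ws =>
      simp only [List.foldl_cons, if_true]
      cases ws with
      | nil => simp
      | cons v vs =>
        rw [foldB_tail (v :: vs) (PySem.Dict.empty.insert c "first") w (by simp)]
        simp

-- ===== VERDICT (by name: the statement is the Claim_ definition above) =====
theorem analyze_cell_positions_spec : Claim_equal_analyze_cell_positions := by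
  intro row_cells _
  unfold Spec_analyze_cell_positions
  exact analyze_cell_positions_eq row_cells
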